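-- pv_equiv track=rewrite | github.com/gali1998/ExtendedIntroToCSHomework | 5/reference.py | prefix_suffix_overlap_hash2
-- ===== SOURCE A (Python) =====
-- def prefix_suffix_overlap_hash2(lst, k):
--     dictionary = {}
--     res = []
--     for i in range(0, len(lst)):
--         # Going through all the strings once to take prefixes
--         prefix = lst[i][0:k]  # Determining the prefix of said string
--         if prefix in dictionary:
--             dictionary[prefix].append(i)
--         else:
--             dictionary[prefix] = [i]
--     for j in range(0, len(lst)):
--         # Going through all the strings to determine suffixes
--         suffix = lst[j][-k:]
--         # Going to that slot in the dictionary to get all indexes with stored prefix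
--         if suffix in dictionary:
--             for ind in range(0, len(dictionary[suffix])):
--                 # Adding each and every one from the slot
--                 if dictionary[suffix][ind] != j:  # Same string
--                     res.append((dictionary[suffix][ind], j))
--     return res
-- ===== SOURCE B (Python) =====
-- def prefix_suffix_overlap_hash2(lst, k):
--     n = len(lst)
--     return [(i, j) for j in range(n) for i in range(n)
--             if i != j and lst[i][0:k] == lst[j][-k:]]
-- ===== Notes on version B (the rewrite author's own statement) =====
-- stated objective: simpler
-- what changed: Replaced A's two-pass prefix-indexed dictionary (group indices by k-prefix, then look up each suffix) with a single j-outer/i-inner double loop that compares lst[i][0:k] with lst[j][-k:] directly.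
import Mathlib
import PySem

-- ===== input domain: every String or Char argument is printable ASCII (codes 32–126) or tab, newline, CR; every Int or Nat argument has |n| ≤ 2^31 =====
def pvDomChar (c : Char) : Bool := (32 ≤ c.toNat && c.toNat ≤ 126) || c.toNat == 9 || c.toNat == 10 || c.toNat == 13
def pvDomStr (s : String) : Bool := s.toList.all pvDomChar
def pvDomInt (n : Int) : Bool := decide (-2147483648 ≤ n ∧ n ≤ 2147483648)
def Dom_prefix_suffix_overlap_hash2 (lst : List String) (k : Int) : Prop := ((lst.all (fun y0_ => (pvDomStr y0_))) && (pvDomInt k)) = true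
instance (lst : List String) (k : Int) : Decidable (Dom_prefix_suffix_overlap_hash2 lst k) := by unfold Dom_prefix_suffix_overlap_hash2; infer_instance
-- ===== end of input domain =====

-- B replaces A's prefix-indexed dictionary with a plain j-outer/i-inner double loop
-- comparing the two slices directly (objective: simpler; B does more slice comparisons).

-- ===== PORT A =====
def prefix_suffix_overlap_hash2 (lst : List String) (k : Int) : List (Int × Int) :=
  let dictionary : PySem.Dict String (List Int) :=
    (PySem.List.pyRange 0 (PySem.List.len lst)).foldl
      (fun d i =>
        let pfx := PySem.Str.slice (PySem.List.pyGetD lst i "") (some 0) (some k)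
        if (d.get? pfx).isSome then d.modify pfx [] (fun l => l ++ [i])
        else d.insert pfx [i])
      PySem.Dict.empty
  (PySem.List.pyRange 0 (PySem.List.len lst)).foldl
    (fun res j =>
      let suffix := PySem.Str.slice (PySem.List.pyGetD lst j "") (some (-k)) none
      match dictionary.get? suffix with
      | some slot =>
        (PySem.List.pyRange 0 (PySem.List.len slot)).foldl
          (fun res ind =>
            if PySem.List.pyGetD slot ind 0 ≠ j then
              res ++ [(PySem.List.pyGetD slot ind 0, j)]
            else res)
          res
      | none => res)
    []

-- ===== PORT B =====
def prefix_suffix_overlap_hash2_alt (lst : List String) (k : Int) : List (Int × Int) :=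
  (PySem.List.pyRange 0 (PySem.List.len lst)).flatMap (fun j =>
    (PySem.List.pyRange 0 (PySem.List.len lst)).filterMap (fun i =>
      if i ≠ j ∧ PySem.Str.slice (PySem.List.pyGetD lst i "") (some 0) (some k)
               = PySem.Str.slice (PySem.List.pyGetD lst j "") (some (-k)) none
      then some (i, j) else none))

-- ===== PRECONDITION & SPEC =====
def Spec_prefix_suffix_overlap_hash2 (lst : List String) (k : Int) (out : List (Int × Int)) : Prop := out = prefix_suffix_overlap_hash2_alt lst k
instance (lst : List String) (k : Int) (out : List (Int × Int)) : Decidable (Spec_prefix_suffix_overlap_hash2 lst k out) := by unfold Spec_prefix_suffix_overlap_hash2; infer_instance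

-- ===== CLAIM (what is proved, stated in full; the proofs are below) =====
def Claim_equal_prefix_suffix_overlap_hash2 : Prop := ∀ (lst : List String) (k : Int), Dom_prefix_suffix_overlap_hash2 lst k → Spec_prefix_suffix_overlap_hash2 lst k (prefix_suffix_overlap_hash2 lst k)

-- ===== LEMMAS AND PROOFS =====

-- get? after modify (modify k [] f overwrites key k with f of its old value, or inserts)
lemma psu_get?_modify (d : PySem.Dict String (List Int)) (p s : String) (f : List Int → List Int) :
    (d.modify p [] f).get? s = if s = p then some (f (d.getD p [])) else d.get? s := by
  by_cases h : s = p
  · subst h; simp [PySem.Dict.modify, PySem.Dict.get?_insert_self]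
  · simp [PySem.Dict.modify, PySem.Dict.get?_insert_of_ne _ _ h, h]

-- invariant of A's first loop: the dictionary maps a string s to exactly the processed
-- indices whose k-prefix is s (in order), and has no entry when there are none
lemma psu_build_get? (lst : List String) (k : Int) (L : List Int) (s : String) :
    (L.foldl
      (fun d i =>
        if (d.get? (PySem.Str.slice (PySem.List.pyGetD lst i "") (some 0) (some k))).isSome then
          d.modify (PySem.Str.slice (PySem.List.pyGetD lst i "") (some 0) (some k)) []
            (fun l => l ++ [i])
        else d.insert (PySem.Str.slice (PySem.List.pyGetD lst i "") (some 0) (some k)) [i])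
      (PySem.Dict.empty : PySem.Dict String (List Int))).get? s
    = (if L.filter
          (fun i => PySem.Str.slice (PySem.List.pyGetD lst i "") (some 0) (some k) = s) = []
       then none
       else some (L.filter
          (fun i => PySem.Str.slice (PySem.List.pyGetD lst i "") (some 0) (some k) = s))) := by
  induction L using List.reverseRecOn generalizing s with
  | nil => simp [PySem.Dict.get?_empty]
  | append_singleton L i ih =>
    rw [List.foldl_append, List.foldl_cons, List.foldl_nil, List.filter_append,
      List.filter_cons, List.filter_nil]
    set D := L.foldl
      (fun d i =>
        if (d.get? (PySem.Str.slice (PySem.List.pyGetD lst i "") (some 0) (some k))).isSome then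
          d.modify (PySem.Str.slice (PySem.List.pyGetD lst i "") (some 0) (some k)) []
            (fun l => l ++ [i])
        else d.insert (PySem.Str.slice (PySem.List.pyGetD lst i "") (some 0) (some k)) [i])
      (PySem.Dict.empty : PySem.Dict String (List Int)) with hD
    by_cases hF : L.filter
        (fun i' => PySem.Str.slice (PySem.List.pyGetD lst i' "") (some 0) (some k)
                 = PySem.Str.slice (PySem.List.pyGetD lst i "") (some 0) (some k)) = []
    · -- no prior index shares this prefix: the insert branch runs
      rw [ih, if_pos hF]
      simp only [Option.isSome_none, Bool.false_eq_true, if_false]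
      rw [PySem.Dict.get?_insert]
      by_cases hs : PySem.Str.slice (PySem.List.pyGetD lst i "") (some 0) (some k) = s
      · subst hs
        simp [hF]
      · rw [if_neg (fun h => hs h.symm), ih]
        simp [hs]
    · -- the slot exists: the modify (append) branch runs
      rw [ih, if_neg hF]
      simp only [Option.isSome_some, if_true]
      rw [psu_get?_modify]
      have hgetD : D.getD (PySem.Str.slice (PySem.List.pyGetD lst i "") (some 0) (some k)) []
          = L.filter
              (fun i' => PySem.Str.slice (PySem.List.pyGetD lst i' "") (some 0) (some k)
                       = PySem.Str.slice (PySem.List.pyGetD lst i "") (some 0) (some k)) := by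
        simp [PySem.Dict.getD, ih, hF]
      by_cases hs : PySem.Str.slice (PySem.List.pyGetD lst i "") (some 0) (some k) = s
      · subst hs
        rw [if_pos rfl, hgetD]
        simp [hF]
      · rw [if_neg (fun h => hs h.symm), ih]
        simp [hs]

-- A's inner loop over a dictionary slot appends the (index, j) pairs with index ≠ j
lemma psu_slot_loop (slot : List Int) (j : Int) (res : List (Int × Int)) :
    ((PySem.List.pyRange 0 (PySem.List.len slot)).foldl
      (fun res ind =>
        if PySem.List.pyGetD slot ind 0 ≠ j then
          res ++ [(PySem.List.pyGetD slot ind 0, j)]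
        else res)
      res)
    = res ++ (slot.filter (fun x => x ≠ j)).map (fun x => (x, j)) := by
  rw [PySem.List.foldl_pyRange_pyGetD slot 0
    (fun res x => if x ≠ j then res ++ [(x, j)] else res) res (le_refl 0)]
  simp only [Int.toNat_zero, List.drop_zero]
  have : (fun (res : List (Int × Int)) (x : Int) => if x ≠ j then res ++ [(x, j)] else res)
      = (fun res x => if (fun x => decide (x ≠ j)) x = true then res ++ [(x, j)] else res) := by
    funext res x; by_cases h : x = j <;> simp [h]
  rw [this, PySem.List.foldl_append_if]

-- B's inner comprehension, as filter-then-map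
lemma psu_filterMap (L : List Int) (j : Int) (q : Int → Prop) [DecidablePred q] :
    L.filterMap (fun i => if i ≠ j ∧ q i then some (i, j) else none)
    = (L.filter (fun i => i ≠ j ∧ q i)).map (fun i => (i, j)) := by
  induction L with
  | nil => rfl
  | cons a L ih =>
    by_cases h : a ≠ j ∧ q a <;> simp [h, ih]

-- ===== VERDICT (by name: the statement is the Claim_ definition above) =====
theorem prefix_suffix_overlap_hash2_spec : Claim_equal_prefix_suffix_overlap_hash2 := by
  intro lst k _
  unfold Spec_prefix_suffix_overlap_hash2
  simp only [prefix_suffix_overlap_hash2, prefix_suffix_overlap_hash2_alt]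
  have hbody : ∀ (res : List (Int × Int)) (j : Int),
      (match
        ((PySem.List.pyRange 0 (PySem.List.len lst)).foldl
          (fun d i =>
            if (d.get? (PySem.Str.slice (PySem.List.pyGetD lst i "") (some 0) (some k))).isSome then
              d.modify (PySem.Str.slice (PySem.List.pyGetD lst i "") (some 0) (some k)) []
                (fun l => l ++ [i])
            else d.insert (PySem.Str.slice (PySem.List.pyGetD lst i "") (some 0) (some k)) [i])
          (PySem.Dict.empty : PySem.Dict String (List Int))).get?
            (PySem.Str.slice (PySem.List.pyGetD lst j "") (some (-k)) none) with
      | some slot =>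
        (PySem.List.pyRange 0 (PySem.List.len slot)).foldl
          (fun res ind =>
            if PySem.List.pyGetD slot ind 0 ≠ j then
              res ++ [(PySem.List.pyGetD slot ind 0, j)]
            else res)
          res
      | none => res)
      = res ++
          ((PySem.List.pyRange 0 (PySem.List.len lst)).filterMap (fun i =>
            if i ≠ j ∧ PySem.Str.slice (PySem.List.pyGetD lst i "") (some 0) (some k)
                     = PySem.Str.slice (PySem.List.pyGetD lst j "") (some (-k)) none
            then some (i, j) else none)) := by
    intro res j
    rw [psu_build_get? lst k (PySem.List.pyRange 0 (PySem.List.len lst))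
      (PySem.Str.slice (PySem.List.pyGetD lst j "") (some (-k)) none)]
    rw [psu_filterMap _ j
      (fun i => PySem.Str.slice (PySem.List.pyGetD lst i "") (some 0) (some k)
              = PySem.Str.slice (PySem.List.pyGetD lst j "") (some (-k)) none)]
    by_cases hF : (PySem.List.pyRange 0 (PySem.List.len lst)).filter
        (fun i => PySem.Str.slice (PySem.List.pyGetD lst i "") (some 0) (some k)
                = PySem.Str.slice (PySem.List.pyGetD lst j "") (some (-k)) none) = []
    · rw [if_pos hF]
      have hnil : (PySem.List.pyRange 0 (PySem.List.len lst)).filter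
          (fun i => i ≠ j ∧ PySem.Str.slice (PySem.List.pyGetD lst i "") (some 0) (some k)
                  = PySem.Str.slice (PySem.List.pyGetD lst j "") (some (-k)) none) = [] := by
        rw [List.filter_eq_nil_iff] at hF ⊢
        intro a ha
        simp only [decide_eq_true_eq] at *
        exact fun h => hF a ha h.2
      rw [hnil]
      simp
    · rw [if_neg hF]
      simp only []
      rw [psu_slot_loop]
      congr 1
      rw [List.filter_filter]
      simp
  have : (fun (res : List (Int × Int)) (j : Int) =>
      (match
        ((PySem.List.pyRange 0 (PySem.List.len lst)).foldl
          (fun d i =>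
            if (d.get? (PySem.Str.slice (PySem.List.pyGetD lst i "") (some 0) (some k))).isSome then
              d.modify (PySem.Str.slice (PySem.List.pyGetD lst i "") (some 0) (some k)) []
                (fun l => l ++ [i])
            else d.insert (PySem.Str.slice (PySem.List.pyGetD lst i "") (some 0) (some k)) [i])
          (PySem.Dict.empty : PySem.Dict String (List Int))).get?
            (PySem.Str.slice (PySem.List.pyGetD lst j "") (some (-k)) none) with
      | some slot =>
        (PySem.List.pyRange 0 (PySem.List.len slot)).foldl
          (fun res ind =>
            if PySem.List.pyGetD slot ind 0 ≠ j then
              res ++ [(PySem.List.pyGetD slot ind 0, j)]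
            else res)
          res
      | none => res))
      = (fun res j => res ++
          ((PySem.List.pyRange 0 (PySem.List.len lst)).filterMap (fun i =>
            if i ≠ j ∧ PySem.Str.slice (PySem.List.pyGetD lst i "") (some 0) (some k)
                     = PySem.Str.slice (PySem.List.pyGetD lst j "") (some (-k)) none
            then some (i, j) else none))) := by
    funext res j; exact hbody res j
  rw [this, PySem.List.foldl_append_eq_flatMap]
  simp
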